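-- pv_equiv track=rewrite | github.com/julienc91/adventofcode | 2023/10/10.py | simplify_grid
-- ===== SOURCE A (Python) =====
-- def simplify_grid(grid: list[str], path: list[tuple[int, int]]) -> list[str]:
--     path_items = set(path)
--     simplified_grid = []
--     for y in range(len(grid)):
--         line = ""
--         for x in range(len(grid[y])):
--             line += grid[y][x] if (x, y) in path_items else "."
--         simplified_grid.append(line)
--     return simplified_grid
-- ===== SOURCE B (Python) =====
-- def simplify_grid(grid: list[str], path: list[tuple[int, int]]) -> list[str]:
--     rows = [["."] * len(row) for row in grid]
--     for x, y in path:
--         if 0 <= y < len(grid) and 0 <= x < len(grid[y]):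
--             rows[y][x] = grid[y][x]
--     return ["".join(row) for row in rows]
-- ===== Notes on version B (the rewrite author's own statement) =====
-- stated objective: faster
-- what changed: Instead of testing every grid cell for membership in the path set, B pre-blanks the whole grid and scatters: it walks only the path points, writing each in-bounds point's original character into a mutable row.
import Mathlib
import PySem

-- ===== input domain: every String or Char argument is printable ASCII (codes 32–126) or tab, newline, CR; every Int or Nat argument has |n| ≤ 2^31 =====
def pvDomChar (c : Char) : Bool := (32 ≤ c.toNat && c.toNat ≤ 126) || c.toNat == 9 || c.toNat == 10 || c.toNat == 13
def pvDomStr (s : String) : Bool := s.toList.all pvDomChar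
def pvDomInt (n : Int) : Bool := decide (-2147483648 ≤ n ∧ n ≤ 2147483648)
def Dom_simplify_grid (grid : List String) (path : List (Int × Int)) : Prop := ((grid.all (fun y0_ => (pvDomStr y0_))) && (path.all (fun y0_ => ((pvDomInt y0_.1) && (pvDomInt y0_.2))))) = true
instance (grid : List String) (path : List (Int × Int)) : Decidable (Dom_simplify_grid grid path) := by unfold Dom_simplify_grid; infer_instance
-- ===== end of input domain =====

-- B blanks the grid once and then writes only the path points back in (scatter instead of
-- per-cell membership scan); same asymptotics, fewer membership tests per cell.

-- ===== PORT A =====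
-- A: build each output line cell by cell, keeping grid[y][x] iff (x, y) is in the path set.
def simplify_grid (grid : List String) (path : List (Int × Int)) : List String :=
  let path_items : PySem.Set (Int × Int) := PySem.Set.ofList path
  (List.range grid.length).foldl (fun simplified_grid y =>
    let row := (grid.getD y "").toList
    let line := (List.range row.length).foldl (fun line x =>
      line ++ (if path_items.contains (((x : Nat) : Int), ((y : Nat) : Int)) then String.ofList [row.getD x '.'] else ".")) ""
    simplified_grid ++ [line]) []

-- ===== PORT B =====
-- B-side helper: one in-place write of an in-bounds path point into the blanked rows.
def pvScatter (grid : List String) (rows : List (List Char)) (p : Int × Int) : List (List Char) :=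
  if 0 ≤ p.2 ∧ p.2 < (grid.length : Int) ∧ 0 ≤ p.1 ∧ p.1 < ((grid.getD p.2.toNat "").toList.length : Int) then
    rows.set p.2.toNat ((rows.getD p.2.toNat []).set p.1.toNat ((grid.getD p.2.toNat "").toList.getD p.1.toNat '.'))
  else rows

def simplify_grid_alt (grid : List String) (path : List (Int × Int)) : List String :=
  let rows0 : List (List Char) := grid.map (fun r => List.replicate r.toList.length '.')
  let rows := path.foldl (pvScatter grid) rows0
  rows.map String.ofList

-- ===== PRECONDITION & SPEC =====
def Spec_simplify_grid (grid : List String) (path : List (Int × Int)) (out : List String) : Prop := out = simplify_grid_alt grid path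
instance (grid : List String) (path : List (Int × Int)) (out : List String) : Decidable (Spec_simplify_grid grid path out) := by unfold Spec_simplify_grid; infer_instance

-- ===== CLAIM (what is proved, stated in full; the proofs are below) =====
def Claim_equal_simplify_grid : Prop := ∀ (grid : List String) (path : List (Int × Int)), Dom_simplify_grid grid path → Spec_simplify_grid grid path (simplify_grid grid path)

-- ===== LEMMAS AND PROOFS =====

-- generic fold shapes
lemma foldl_append_singleton {α β : Type} (h : α → β) :
    ∀ (l : List α) (acc : List β), l.foldl (fun acc y => acc ++ [h y]) acc = acc ++ l.map h := by
  intro l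
  induction l with
  | nil => simp
  | cons a t ih => intro acc; simp [List.foldl_cons, ih]

lemma foldl_str_append {α : Type} (g : α → String) :
    ∀ (l : List α) (s : String),
      (l.foldl (fun line x => line ++ g x) s).toList = s.toList ++ l.flatMap (fun x => (g x).toList) := by
  intro l
  induction l with
  | nil => simp
  | cons a t ih => intro s; simp [List.foldl_cons, ih]

-- A's row y, as a plain list of characters
def pvRowA (grid : List String) (path : List (Int × Int)) (y : Nat) : List Char :=
  (List.range (grid.getD y "").toList.length).map (fun x =>
    if (((x : Nat) : Int), ((y : Nat) : Int)) ∈ path then (grid.getD y "").toList.getD x '.' else '.')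

lemma simplify_grid_eq (grid : List String) (path : List (Int × Int)) :
    simplify_grid grid path = (List.range grid.length).map (fun y => String.ofList (pvRowA grid path y)) := by
  unfold simplify_grid
  rw [foldl_append_singleton]
  simp only [List.nil_append]
  apply List.map_congr_left
  intro y _
  apply String.toList_inj.mp
  rw [foldl_str_append]
  simp only [String.toList_empty, List.nil_append, String.toList_ofList, pvRowA]
  rw [List.map_eq_flatMap]
  apply List.flatMap_congr
  intro x _
  by_cases hm : (((x : Nat) : Int), ((y : Nat) : Int)) ∈ path
  · simp [hm]
  · simp [hm]

-- getD after set, totally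
lemma getD_set {α : Type} (l : List α) (i j : Nat) (a d : α) :
    (l.set i a).getD j d = if i = j ∧ i < l.length then a else l.getD j d := by
  simp only [List.getD_eq_getElem?_getD, List.getElem?_set]
  by_cases h1 : i = j
  · subst h1
    by_cases h2 : i < l.length
    · simp [h2]
    · simp [h2]
  · simp [h1]

-- B's fold invariant
lemma scatter_fold (grid : List String) :
    ∀ (path : List (Int × Int)) (rows : List (List Char)),
      rows.length = grid.length →
      (∀ y, (rows.getD y []).length = (grid.getD y "").toList.length) →
      ((path.foldl (pvScatter grid) rows).length = grid.length ∧
       (∀ y, ((path.foldl (pvScatter grid) rows).getD y []).length = (grid.getD y "").toList.length) ∧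
       ∀ y x, y < grid.length → x < (grid.getD y "").toList.length →
         ((path.foldl (pvScatter grid) rows).getD y []).getD x '.' =
           if (((x : Nat) : Int), ((y : Nat) : Int)) ∈ path then (grid.getD y "").toList.getD x '.'
           else (rows.getD y []).getD x '.') := by
  intro path
  induction path with
  | nil =>
    intro rows h1 h2
    refine ⟨h1, h2, ?_⟩
    intro y x hy hx
    simp
  | cons p ps ih =>
    intro rows h1 h2
    simp only [List.foldl_cons]
    have hlen' : (pvScatter grid rows p).length = grid.length := by
      unfold pvScatter; split <;> simp [h1]
    have hrow' : ∀ y, ((pvScatter grid rows p).getD y []).length = (grid.getD y "").toList.length := by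
      intro y
      unfold pvScatter
      split
      · rw [getD_set]
        split
        · rename_i hset
          rw [List.length_set, ← hset.1]
          exact h2 _
        · exact h2 y
      · exact h2 y
    obtain ⟨L, R, C⟩ := ih (pvScatter grid rows p) hlen' hrow'
    refine ⟨L, R, ?_⟩
    intro y x hy hx
    rw [C y x hy hx]
    by_cases hps : (((x : Nat) : Int), ((y : Nat) : Int)) ∈ ps
    · simp [hps, List.mem_cons]
    · by_cases hp : (((x : Nat) : Int), ((y : Nat) : Int)) = p
      · have hmem : (((x : Nat) : Int), ((y : Nat) : Int)) ∈ p :: ps := by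
          rw [List.mem_cons]; exact Or.inl hp
        rw [if_neg hps, if_pos hmem]
        unfold pvScatter
        have hp1 : p.1 = ((x : Nat) : Int) := by rw [← hp]
        have hp2 : p.2 = ((y : Nat) : Int) := by rw [← hp]
        have hyN : p.2.toNat = y := by omega
        have hxN : p.1.toNat = x := by omega
        have hcond : 0 ≤ p.2 ∧ p.2 < (grid.length : Int) ∧ 0 ≤ p.1 ∧
            p.1 < ((grid.getD p.2.toNat "").toList.length : Int) := by
          rw [hyN]
          refine ⟨by omega, by omega, by omega, by omega⟩
        rw [if_pos hcond, hyN, hxN, getD_set, if_pos ⟨rfl, by omega⟩, getD_set,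
            if_pos ⟨rfl, by rw [h2 y]; exact hx⟩]
      · have hmem : ¬ (((x : Nat) : Int), ((y : Nat) : Int)) ∈ p :: ps := by
          rw [List.mem_cons]; rintro (h | h)
          · exact hp h
          · exact hps h
        rw [if_neg hps, if_neg hmem]
        unfold pvScatter
        split
        · rename_i hc
          rw [getD_set]
          split
          · rename_i hset
            have hyN : p.2.toNat = y := hset.1
            rw [getD_set]
            split
            · rename_i hxset
              exfalso
              apply hp
              have e1 : p.1 = ((x : Nat) : Int) := by omega
              have e2 : p.2 = ((y : Nat) : Int) := by omega
              exact Prod.ext e1.symm e2.symm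
            · rw [hyN]
          · rfl
        · rfl

-- ===== VERDICT (by name: the statement is the Claim_ definition above) =====
theorem simplify_grid_spec : Claim_equal_simplify_grid := by
  intro grid path _
  unfold Spec_simplify_grid
  rw [simplify_grid_eq]
  unfold simplify_grid_alt
  have h2 : ∀ y, ((grid.map (fun r => List.replicate r.toList.length '.')).getD y []).length
      = (grid.getD y "").toList.length := by
    intro y
    by_cases hy : y < grid.length
    · rw [List.getD_eq_getElem (hn := by simpa using hy), List.getD_eq_getElem (hn := hy)]
      simp
    · rw [List.getD_eq_getElem?_getD, List.getD_eq_getElem?_getD,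
        List.getElem?_eq_none (by simpa using (by omega : grid.length ≤ y)),
        List.getElem?_eq_none (by omega : grid.length ≤ y)]
      simp
  obtain ⟨L, R, C⟩ := scatter_fold grid path
    (grid.map (fun r => List.replicate r.toList.length '.')) (by simp) h2
  apply List.ext_getElem
  · simp only [List.length_map, List.length_range]
    exact L.symm
  · intro y hy1 hy2
    simp only [List.getElem_map, List.getElem_range]
    have hyg : y < grid.length := by simpa using hy1
    have hyr : y < (path.foldl (pvScatter grid) (grid.map (fun r => List.replicate r.toList.length '.'))).length := by
      simpa using hy2
    congr 1
    apply List.ext_getElem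
    · rw [pvRowA]
      have := R y
      rw [List.getD_eq_getElem (hn := hyr)] at this
      simpa using this.symm
    · intro x hx1 hx2
      have hx : x < (grid.getD y "").toList.length := by simpa [pvRowA] using hx1
      have hC := C y x hyg hx
      rw [List.getD_eq_getElem (hn := hyr), List.getD_eq_getElem (hn := hx2)] at hC
      simp only [pvRowA, List.getElem_map, List.getElem_range]
      rw [hC]
      have hr0 : ((grid.map (fun r => List.replicate r.toList.length '.')).getD y []).getD x '.' = '.' := by
        rw [List.getD_eq_getElem (l := grid.map (fun r => List.replicate r.toList.length '.'))
              (hn := by simpa using hyg)]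
        simp only [List.getElem_map, List.getD_eq_getElem?_getD, List.getElem?_replicate]
        split <;> rfl
      rw [hr0]
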